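-- pv_equiv track=rewrite | github.com/antonk404/quiz-solver-stepik | src/stepik/solvers.py | _build_sorting_order
-- ===== SOURCE A (Python) =====
-- def _find_option_index(
--     target: str,
--     options: list[str],
--     used: set[int],
-- ) -> int | None:
--     """Ищет индекс совпадения: сначала точное, потом по регистру."""
--     for j, option in enumerate(options):
--         if j not in used and option == target:
--             return j
--
--     lower_target = target.lower()
--     for j, option in enumerate(options):
--         if j not in used and option.lower() == lower_target:
--             return j
--
--     # Fuzzy: содержание (для случаев с лишними пробелами)
--     stripped = target.strip().lower()
--     for j, option in enumerate(options):
--         if j not in used and option.strip().lower() == stripped: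
--             return j
--
--     return None
--
-- def _build_sorting_order(
--     correct_order: list[str],
--     shuffled: list[str],
-- ) -> list[int] | None:
--     """Находит перестановку correct_order → shuffled."""
--     if len(correct_order) != len(shuffled):
--         return None
--
--     ordering: list[int] = []
--     used: set[int] = set()
--
--     for item in correct_order:
--         found = _find_option_index(item, shuffled, used)
--         if found is not None:
--             ordering.append(found)
--             used.add(found)
--         else:
--             return None
--
--     return ordering
-- ===== SOURCE B (Python) =====
-- def _find_candidate(target, options, used):
--     """Single pass: return first unused exact match immediately; otherwise
--     remember the first unused case-insensitive and first unused
--     stripped-case-insensitive matches seen along the way."""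
--     lower_target = target.lower()
--     stripped_target = target.strip().lower()
--     lower_hit = None
--     stripped_hit = None
--     for j, option in enumerate(options):
--         if j in used:
--             continue
--         if option == target:
--             return j
--         if lower_hit is None and option.lower() == lower_target:
--             lower_hit = j
--         if stripped_hit is None and option.strip().lower() == stripped_target:
--             stripped_hit = j
--     return lower_hit if lower_hit is not None else stripped_hit
--
--
-- def _build_sorting_order(correct_order, shuffled):
--     if len(correct_order) != len(shuffled):
--         return None
--     ordering = []
--     used = set()
--     for item in correct_order:
--         found = _find_candidate(item, shuffled, used)
--         if found is None:
--             return None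
--         ordering.append(found)
--         used.add(found)
--     return ordering
-- ===== Notes on version B (the rewrite author's own statement) =====
-- stated objective: alternative
-- what changed: Replaces the helper's three sequential scans (exact, lowercase, stripped+lowercase) with one pass over the options that early-returns on the first unused exact match and tracks the first lowercase and stripped candidates as it goes.
import Mathlib
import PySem

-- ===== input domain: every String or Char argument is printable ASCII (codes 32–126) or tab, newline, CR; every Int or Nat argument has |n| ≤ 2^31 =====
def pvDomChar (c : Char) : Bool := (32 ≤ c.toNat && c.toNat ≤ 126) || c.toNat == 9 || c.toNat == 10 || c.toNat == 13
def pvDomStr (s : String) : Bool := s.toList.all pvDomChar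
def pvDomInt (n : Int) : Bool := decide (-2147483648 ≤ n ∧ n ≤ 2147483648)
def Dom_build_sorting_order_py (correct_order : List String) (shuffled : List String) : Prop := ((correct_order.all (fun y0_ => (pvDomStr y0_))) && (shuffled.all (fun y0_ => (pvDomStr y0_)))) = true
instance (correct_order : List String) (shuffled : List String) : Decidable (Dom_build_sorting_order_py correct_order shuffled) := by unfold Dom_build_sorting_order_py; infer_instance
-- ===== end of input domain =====

-- B replaces the helper's three sequential scans (exact / lowercase / stripped) by a single
-- pass that early-returns on the first unused exact match and tracks first lowercase and
-- stripped candidates (alternative decomposition, at most one scan per item).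


-- ===== PORT A =====
-- _find_option_index: three sequential first-match scans over enumerate(options)
def pvFindA (target : String) (options : List String) (used : PySem.Set Int) : Option Int :=
  match (PySem.List.enumerate options).find?
      (fun p => !(PySem.Set.contains used p.1) && p.2 == target) with
  | some p => some p.1
  | none =>
    let lowerTarget := PySem.Str.lower target
    match (PySem.List.enumerate options).find?
        (fun p => !(PySem.Set.contains used p.1) && PySem.Str.lower p.2 == lowerTarget) with
    | some p => some p.1
    | none =>
      let stripped := PySem.Str.lower (PySem.Str.strip target)
      match (PySem.List.enumerate options).find?
          (fun p => !(PySem.Set.contains used p.1) && PySem.Str.lower (PySem.Str.strip p.2) == stripped) with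
      | some p => some p.1
      | none => none

-- the 'for item in correct_order' loop of _build_sorting_order
def pvLoopA (shuffled : List String) : List String → List Int → PySem.Set Int → Option (List Int)
  | [], ordering, _ => some ordering
  | item :: rest, ordering, used =>
    match pvFindA item shuffled used with
    | some f => pvLoopA shuffled rest (ordering ++ [f]) (PySem.Set.add used f)
    | none => none

def build_sorting_order_py (correct_order : List String) (shuffled : List String) : Option (List Int) :=
  if correct_order.length ≠ shuffled.length then none
  else pvLoopA shuffled correct_order [] PySem.Set.empty

-- ===== PORT B =====
-- _find_candidate: one pass, early return on exact, accumulators for lower/stripped hits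
def pvFindBGo (target lowerTarget strippedTarget : String) (used : PySem.Set Int) :
    List (Int × String) → Option Int → Option Int → Option Int
  | [], lowerHit, strippedHit =>
    match lowerHit with
    | some j => some j
    | none => strippedHit
  | (j, option) :: rest, lowerHit, strippedHit =>
    if PySem.Set.contains used j then
      pvFindBGo target lowerTarget strippedTarget used rest lowerHit strippedHit
    else if option == target then some j
    else
      let lowerHit' := if lowerHit.isNone && (PySem.Str.lower option == lowerTarget)
        then some j else lowerHit
      let strippedHit' := if strippedHit.isNone && (PySem.Str.lower (PySem.Str.strip option) == strippedTarget)
        then some j else strippedHit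
      pvFindBGo target lowerTarget strippedTarget used rest lowerHit' strippedHit'

def pvFindB (target : String) (options : List String) (used : PySem.Set Int) : Option Int :=
  pvFindBGo target (PySem.Str.lower target) (PySem.Str.lower (PySem.Str.strip target)) used
    (PySem.List.enumerate options) none none

def pvLoopB (shuffled : List String) : List String → List Int → PySem.Set Int → Option (List Int)
  | [], ordering, _ => some ordering
  | item :: rest, ordering, used =>
    match pvFindB item shuffled used with
    | some f => pvLoopB shuffled rest (ordering ++ [f]) (PySem.Set.add used f)
    | none => none

def build_sorting_order_py_alt (correct_order : List String) (shuffled : List String) : Option (List Int) :=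
  if correct_order.length ≠ shuffled.length then none
  else pvLoopB shuffled correct_order [] PySem.Set.empty

-- ===== PRECONDITION & SPEC =====
def Spec_build_sorting_order_py (correct_order : List String) (shuffled : List String) (out : Option (List Int)) : Prop := out = build_sorting_order_py_alt correct_order shuffled
instance (correct_order : List String) (shuffled : List String) (out : Option (List Int)) : Decidable (Spec_build_sorting_order_py correct_order shuffled out) := by unfold Spec_build_sorting_order_py; infer_instance

-- ===== CLAIM (what is proved, stated in full; the proofs are below) =====
def Claim_equal_build_sorting_order_py : Prop := ∀ (correct_order : List String) (shuffled : List String), Dom_build_sorting_order_py correct_order shuffled → Spec_build_sorting_order_py correct_order shuffled (build_sorting_order_py correct_order shuffled)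

-- ===== LEMMAS AND PROOFS =====

-- B's single pass computes: the first unused exact hit if any, else the recorded/first unused
-- lowercase hit, else the recorded/first unused stripped hit.
lemma pvFindBGo_spec (t lt st : String) (used : PySem.Set Int) (l : List (Int × String))
    (lh sh : Option Int) :
    pvFindBGo t lt st used l lh sh =
      match l.find? (fun (p : Int × String) => !(PySem.Set.contains used p.1) && p.2 == t) with
      | some p => some p.1
      | none =>
        match (match lh with
               | some j => some j
               | none => (l.find? (fun (p : Int × String) => !(PySem.Set.contains used p.1) && PySem.Str.lower p.2 == lt)).map Prod.fst) with
        | some j => some j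
        | none =>
          match sh with
          | some j => some j
          | none => (l.find? (fun (p : Int × String) => !(PySem.Set.contains used p.1) && PySem.Str.lower (PySem.Str.strip p.2) == st)).map Prod.fst := by
  induction l generalizing lh sh with
  | nil =>
    cases lh <;> cases sh <;> rfl
  | cons hd tl ih =>
    obtain ⟨j, o⟩ := hd
    by_cases hu : j ∈ used
    · simp [pvFindBGo, List.find?, hu, ih]
    · by_cases he : o = t
      · simp [pvFindBGo, List.find?, hu, he]
      · have hbe : (o == t) = false := beq_eq_false_iff_ne.mpr he
        simp only [pvFindBGo, List.find?, ih, PySem.Set.contains_eq_listContains, hbe]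
        cases lh <;> cases sh <;>
          cases hl : (PySem.Str.lower o == lt) <;>
          cases hs : (PySem.Str.lower (PySem.Str.strip o) == st) <;>
          simp [hl, hs, hu, hbe, Option.isNone]

lemma pvFindB_eq_pvFindA (t : String) (opts : List String) (used : PySem.Set Int) :
    pvFindB t opts used = pvFindA t opts used := by
  simp only [pvFindB, pvFindA, pvFindBGo_spec]
  cases h1 : (PySem.List.enumerate opts).find?
      (fun p => !(PySem.Set.contains used p.1) && p.2 == t) with
  | some p => simp [h1]
  | none =>
    cases h2 : (PySem.List.enumerate opts).find?
        (fun p => !(PySem.Set.contains used p.1) && PySem.Str.lower p.2 == PySem.Str.lower t) with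
    | some p => simp [h1, h2]
    | none =>
      cases h3 : (PySem.List.enumerate opts).find?
          (fun p => !(PySem.Set.contains used p.1) &&
            PySem.Str.lower (PySem.Str.strip p.2) == PySem.Str.lower (PySem.Str.strip t)) with
      | some p => simp [h1, h2, h3]
      | none => simp [h1, h2, h3]

lemma pvLoopB_eq_pvLoopA (shuffled : List String) (items : List String)
    (ordering : List Int) (used : PySem.Set Int) :
    pvLoopB shuffled items ordering used = pvLoopA shuffled items ordering used := by
  induction items generalizing ordering used with
  | nil => rfl
  | cons item rest ih =>
    simp only [pvLoopA, pvLoopB, pvFindB_eq_pvFindA]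
    cases pvFindA item shuffled used with
    | some f => exact ih _ _
    | none => rfl

-- ===== VERDICT (by name: the statement is the Claim_ definition above) =====
theorem build_sorting_order_py_spec : Claim_equal_build_sorting_order_py := by
  intro co sh _
  unfold Spec_build_sorting_order_py build_sorting_order_py build_sorting_order_py_alt
  rw [pvLoopB_eq_pvLoopA]
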